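-- pv_equiv track=rewrite | github.com/osks/pylyskom | pylyskom/utils.py | case_insensitive_regexp
-- ===== SOURCE A (Python) =====
-- def case_insensitive_regexp(regexp, collate_table):
--     """Make regular expression case insensitive"""
--     result = ""
--     inside_brackets = 0
--     for c in regexp:
--         if c == "[":
--             inside_brackets = 1
--
--         if inside_brackets:
--             eqv_chars = c
--         else:
--             eqv_chars = _equivalent_chars(c, collate_table)
--
--         if len(eqv_chars) > 1:
--             result += "[%s]" % eqv_chars
--         else:
--             result += eqv_chars
--
--         if c == "]":
--             inside_brackets = 0
--
--     return result
--
-- def _equivalent_chars(c, collate_table):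
--     """Find all chars equivalent to c in collate table"""
--     c_ord = ord(c)
--     if c_ord >= len(collate_table):
--         return c
--
--     result = ""
--     norm_char = collate_table[c_ord]
--     next_index = 0
--     while 1:
--         next_index = collate_table.find(norm_char, next_index)
--         if next_index == -1:
--             break
--         result += chr(next_index)
--         next_index += 1
--
--     return result
-- ===== SOURCE B (Python) =====
-- def case_insensitive_regexp(regexp, collate_table):
--     """Make regular expression case insensitive"""
--     # Build each char's equivalence class once from the collate table,
--     # then consume bracket groups of the regexp segment-wise.
--     classes = {}
--     for i, ch in enumerate(collate_table):
--         classes[ch] = classes.get(ch, "") + chr(i)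
--     out = []
--     i = 0
--     n = len(regexp)
--     while i < n:
--         c = regexp[i]
--         if c == "[":
--             j = regexp.find("]", i + 1)
--             if j == -1:
--                 out.append(regexp[i:])
--                 i = n
--             else:
--                 out.append(regexp[i:j + 1])
--                 i = j + 1
--         else:
--             if ord(c) < len(collate_table):
--                 eqv = classes[collate_table[ord(c)]]
--             else:
--                 eqv = c
--             out.append("[%s]" % eqv if len(eqv) > 1 else eqv)
--             i += 1
--     return "".join(out)
-- ===== Notes on version B (the rewrite author's own statement) =====
-- stated objective: faster
-- what changed: B precomputes each character's equivalence class once by a single grouping pass over the collate table (dict keyed by normalized char) and consumes each bracket group of the regexp as one verbatim segment via find, instead of A's per-character full rescan of the collate table and per-character inside_brackets flag.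
import Mathlib
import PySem

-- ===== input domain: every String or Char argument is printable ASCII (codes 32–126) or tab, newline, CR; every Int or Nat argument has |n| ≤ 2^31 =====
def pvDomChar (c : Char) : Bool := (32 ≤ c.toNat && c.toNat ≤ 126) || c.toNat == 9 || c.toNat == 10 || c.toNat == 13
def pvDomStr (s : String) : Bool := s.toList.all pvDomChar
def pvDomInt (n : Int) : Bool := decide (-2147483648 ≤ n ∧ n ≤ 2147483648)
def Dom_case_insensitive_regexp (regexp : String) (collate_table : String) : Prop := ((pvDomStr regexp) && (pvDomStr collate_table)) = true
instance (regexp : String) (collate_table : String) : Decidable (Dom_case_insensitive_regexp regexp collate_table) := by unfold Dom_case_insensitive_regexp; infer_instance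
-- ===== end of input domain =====

-- B builds the equivalence classes once in a dict and consumes bracket groups segment-wise,
-- instead of A's per-character collate-table rescan with an inside-brackets flag (objective: faster).

-- ===== PORT A =====

-- bound on str.find(sub, start): needed by eqvLoop's termination (cited in decreasing_by)
theorem pvFindFrom_bound (L sub : List Char) (k : Nat) (hsub : sub ≠ [])
    (h : PySem.Chars.findFrom L sub (k : Int) none ≠ -1) :
    k ≤ (PySem.Chars.findFrom L sub (k : Int) none).toNat ∧
      (PySem.Chars.findFrom L sub (k : Int) none).toNat < L.length := by
  by_cases hk : k ≤ L.length
  · obtain ⟨h1, h2, -⟩ := PySem.Chars.findFrom_natCast_spec L sub k hk h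
    obtain ⟨t, ht⟩ := h2
    have hlen : sub.length + t.length = (L.drop (PySem.Chars.findFrom L sub (↑k) none).toNat).length := by
      rw [← ht]; simp
    have hsl : 0 < sub.length := List.length_pos_iff.mpr hsub
    simp only [List.length_drop] at hlen
    omega
  · exfalso; apply h
    simp only [PySem.Chars.findFrom]
    rw [if_pos]
    omega

-- A's while loop in _equivalent_chars: result += chr(next_index); next_index = find(norm, next_index) + 1
def eqvLoop (L : List Char) (norm : Char) (next : Nat) (acc : List Char) : List Char :=
  if h : PySem.Chars.findFrom L [norm] (next : Int) none = -1 then acc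
  else
    eqvLoop L norm ((PySem.Chars.findFrom L [norm] (next : Int) none).toNat + 1)
      (acc ++ [Char.ofNat (PySem.Chars.findFrom L [norm] (next : Int) none).toNat])
termination_by L.length + 1 - next
decreasing_by
  have := pvFindFrom_bound L [norm] next (by simp) h
  omega

-- _equivalent_chars(c, collate_table); the index collate_table[ord(c)] is guarded by the branch, so getD is exact
def eqvChars (c : Char) (L : List Char) : List Char :=
  if L.length ≤ c.toNat then [c]
  else eqvLoop L (L.getD c.toNat default) 0 []

-- one iteration of A's for-loop; state = (result, inside_brackets)
def stepA (L : List Char) (st : List Char × Bool) (c : Char) : List Char × Bool :=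
  let inside := if c = '[' then true else st.2
  let eqv := if inside then [c] else eqvChars c L
  (st.1 ++ (if 1 < eqv.length then '[' :: (eqv ++ [']']) else eqv),
   if c = ']' then false else inside)

def case_insensitive_regexp (regexp : String) (collate_table : String) : String :=
  String.mk ((regexp.toList.foldl (stepA collate_table.toList) ([], false)).1)

-- ===== PORT B =====

-- classes[ch] = classes.get(ch, "") + chr(i), over enumerate(collate_table)
def buildClasses (L : List Char) : PySem.Dict Char (List Char) :=
  (PySem.List.enumerate L 0).foldl
    (fun d p => d.modify p.2 [] (· ++ [Char.ofNat p.1.toNat])) PySem.Dict.empty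

-- emit one non-'[' char: classes.get(collate_table[ord(c)], c), wrapped in [...] when longer than 1
def emitB (L : List Char) (classes : PySem.Dict Char (List Char)) (c : Char) : List Char :=
  let eqv := if c.toNat < L.length then classes.getD (L.getD c.toNat default) [c] else [c]
  if 1 < eqv.length then '[' :: (eqv ++ [']']) else eqv

-- B's while loop over the regexp: a '[' consumes the whole literal segment up to the next ']'
def loopB (L : List Char) (classes : PySem.Dict Char (List Char)) : List Char → List Char
  | [] => []
  | c :: rest =>
    if c = '[' then
      match rest.findIdx? (· == ']') with
      | none => c :: rest
      | some k => (c :: rest.take (k + 1)) ++ loopB L classes (rest.drop (k + 1))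
    else emitB L classes c ++ loopB L classes rest
termination_by l => l.length
decreasing_by
  · simp only [List.length_drop, List.length_cons]; omega
  · simp

def case_insensitive_regexp_alt (regexp : String) (collate_table : String) : String :=
  String.mk (loopB collate_table.toList (buildClasses collate_table.toList) regexp.toList)

-- ===== PRECONDITION & SPEC =====
def Spec_case_insensitive_regexp (regexp : String) (collate_table : String) (out : String) : Prop := out = case_insensitive_regexp_alt regexp collate_table
instance (regexp : String) (collate_table : String) (out : String) : Decidable (Spec_case_insensitive_regexp regexp collate_table out) := by unfold Spec_case_insensitive_regexp; infer_instance

-- ===== CLAIM (what is proved, stated in full; the proofs are below) =====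
def Claim_equal_case_insensitive_regexp : Prop := ∀ (regexp : String) (collate_table : String), Dom_case_insensitive_regexp regexp collate_table → Spec_case_insensitive_regexp regexp collate_table (case_insensitive_regexp regexp collate_table)

-- ===== LEMMAS AND PROOFS =====

-- chr(pos) for every position ≥ j at which the suffix t of the table (starting at j) carries ch
def occT : List Char → Char → Nat → List Char
  | [], _, _ => []
  | a :: r, ch, j => (if a = ch then [Char.ofNat j] else []) ++ occT r ch (j + 1)

theorem occT_of_no_match_aux (ch : Char) :
    ∀ (t : List Char) (j : Nat), (∀ i, (hi : i < t.length) → t[i] ≠ ch) → occT t ch j = [] := by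
  intro t
  induction t with
  | nil => intro j _; rfl
  | cons a r ih =>
    intro j h
    have ha : a ≠ ch := h 0 (by simp)
    simp only [occT, if_neg ha, List.nil_append]
    exact ih (j + 1) (fun i hi => h (i + 1) (by simpa using Nat.succ_lt_succ hi))

theorem occT_of_no_match (L : List Char) (ch : Char) (k : Nat)
    (h : ∀ i, k ≤ i → (hi : i < L.length) → L[i] ≠ ch) :
    occT (L.drop k) ch k = [] := by
  apply occT_of_no_match_aux
  intro i hi
  rw [List.getElem_drop]
  exact h (k + i) (by omega) (by simp at hi; omega)

theorem occT_first (L : List Char) (ch : Char) (k t : Nat) (hkt : k ≤ t) (ht : t < L.length)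
    (hmatch : L[t] = ch) (hmin : ∀ i, k ≤ i → i < t → (hi : i < L.length) → L[i] ≠ ch) :
    occT (L.drop k) ch k = Char.ofNat t :: occT (L.drop (t + 1)) ch (t + 1) := by
  have hd : ∀ n, n ≤ t - k → occT (L.drop (t - n)) ch (t - n) = Char.ofNat t :: occT (L.drop (t + 1)) ch (t + 1) := by
    intro n
    induction n with
    | zero =>
      intro _
      rw [Nat.sub_zero, List.drop_eq_getElem_cons ht]
      simp [occT, hmatch]
    | succ m ih =>
      intro hm
      have hlt : t - (m + 1) < t := by omega
      have hlen : t - (m + 1) < L.length := by omega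
      rw [List.drop_eq_getElem_cons hlen]
      have hne : L[t - (m + 1)] ≠ ch := hmin _ (by omega) hlt hlen
      simp only [occT, if_neg hne, List.nil_append]
      have : t - (m + 1) + 1 = t - m := by omega
      rw [this]
      exact ih (by omega)
  have := hd (t - k) (le_refl _)
  rwa [Nat.sub_sub_self hkt] at this

theorem eqvLoop_eq (L : List Char) (norm : Char) :
    ∀ (next : Nat) (acc : List Char),
      eqvLoop L norm next acc = acc ++ occT (L.drop next) norm next := by
  intro next acc
  induction next, acc using eqvLoop.induct L norm with
  | case1 next acc h =>
    rw [eqvLoop, dif_pos h]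
    by_cases hk : next ≤ L.length
    · have hni := (PySem.Chars.findFrom_natCast_eq_neg_one_iff L [norm] next hk).mp h
      rw [List.singleton_infix_iff] at hni
      rw [occT_of_no_match]
      · simp
      · intro i hki hi hcontra
        apply hni
        have : L[i] ∈ L.drop next := by
          rw [List.mem_iff_getElem]
          exact ⟨i - next, by simp; omega, by rw [List.getElem_drop]; congr 1; omega⟩
        rwa [hcontra] at this
    · rw [List.drop_eq_nil_of_le (by omega)]
      simp [occT]
  | case2 next acc h ih =>
    have hb := pvFindFrom_bound L [norm] next (by simp) h
    have hk : next ≤ L.length := by omega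
    obtain ⟨h1, h2, h3⟩ := PySem.Chars.findFrom_natCast_spec L [norm] next hk h
    set f := (PySem.Chars.findFrom L [norm] (next : Int) none).toNat with hf
    have hmatch : L[f]'(hb.2) = norm := by
      obtain ⟨t, ht⟩ := h2
      have := List.drop_eq_getElem_cons (l := L) (i := f) hb.2
      rw [this] at ht
      have h9 : L[f]? = some norm := by simpa using congrArg (fun l => l.head?) ht.symm
      simpa [List.getElem?_eq_getElem hb.2] using h9
    have hmin : ∀ i, next ≤ i → i < f → (hi : i < L.length) → L[i] ≠ norm := by
      intro i hni hif hi hcontra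
      apply h3 i hni hif
      rw [List.drop_eq_getElem_cons hi, hcontra]
      exact ⟨_, rfl⟩
    rw [eqvLoop, dif_neg h, ih]
    rw [occT_first L norm next f hb.1 hb.2 hmatch hmin]
    simp

theorem eqvChars_eq (c : Char) (L : List Char) :
    eqvChars c L = if c.toNat < L.length then occT L (L.getD c.toNat default) 0 else [c] := by
  unfold eqvChars
  by_cases h : c.toNat < L.length
  · rw [if_neg (by omega), if_pos h, eqvLoop_eq]
    simp
  · rw [if_pos (by omega), if_neg h]

theorem occT_eq_enum (ch : Char) :
    ∀ (t : List Char) (j : Nat),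
      occT t ch j =
        ((PySem.List.enumerate t (j : Int)).filter (fun p => p.2 == ch)).map
          (fun p => Char.ofNat p.1.toNat) := by
  intro t
  induction t with
  | nil => intro j; simp [occT, PySem.List.enumerate_nil]
  | cons a r ih =>
    intro j
    rw [PySem.List.enumerate_cons]
    simp only [occT, List.filter_cons]
    have : ((j : Int) + 1) = ((j + 1 : Nat) : Int) := by push_cast; ring
    rw [this]
    by_cases ha : a = ch
    · simp [ha, ih (j + 1)]
    · simp [ha, ih (j + 1)]

theorem occT_ne_nil_of_mem (ch : Char) :
    ∀ (t : List Char), ch ∈ t → ∀ (j : Nat), occT t ch j ≠ [] := by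
  intro t
  induction t with
  | nil => intro h; simp at h
  | cons a r ih =>
    intro hmem j
    simp only [occT]
    by_cases ha : a = ch
    · simp [ha]
    · have hr : ch ∈ r := by
        rcases List.mem_cons.mp hmem with h | h
        · exact absurd h.symm ha
        · exact h
      simpa [ha] using ih hr (j + 1)

theorem buildClasses_getD (L : List Char) (ch : Char) (dflt : List Char)
    (hmem : ch ∈ L) :
    (buildClasses L).getD ch dflt = occT L ch 0 := by
  have hocc : occT L ch 0 ≠ [] := occT_ne_nil_of_mem ch L hmem 0
  have hfold : buildClasses L =
      ((PySem.List.enumerate L 0).map (fun p => (p.2, Char.ofNat p.1.toNat))).foldl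
        (fun d p => d.modify p.1 [] (· ++ [p.2])) PySem.Dict.empty := by
    rw [List.foldl_map]; rfl
  have hgetD : (buildClasses L).getD ch [] = occT L ch 0 := by
    rw [hfold, PySem.Dict.getD_foldl_modify_append, PySem.Dict.getD_empty]
    rw [List.filter_map, List.map_map]
    rw [occT_eq_enum ch L 0]
    simp [Function.comp_def]
  have hget? : (buildClasses L).get? ch = some (occT L ch 0) := by
    rw [PySem.Dict.getD_eq_get?_getD] at hgetD
    cases h : (buildClasses L).get? ch with
    | none => rw [h] at hgetD; simp at hgetD; exact absurd hgetD hocc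
    | some v => rw [h] at hgetD; simp at hgetD; rw [hgetD]
  rw [PySem.Dict.getD_eq_get?_getD, hget?]
  rfl

theorem emit_eq (L : List Char) (c : Char) :
    (let eqv := eqvChars c L; if 1 < eqv.length then '[' :: (eqv ++ [']']) else eqv) =
      emitB L (buildClasses L) c := by
  show _ = emitB L (buildClasses L) c
  unfold emitB
  rw [eqvChars_eq]
  by_cases h : c.toNat < L.length
  · have hm : L.getD c.toNat default ∈ L := by
      rw [List.getD_eq_getElem L default h]
      exact List.getElem_mem h
    rw [if_pos h, if_pos h, buildClasses_getD L _ _ hm]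
  · rw [if_neg h, if_neg h]

theorem loopA_true (L : List Char) :
    ∀ (cs acc : List Char),
      cs.foldl (stepA L) (acc, true) =
        match cs.findIdx? (· == ']') with
        | none => (acc ++ cs, true)
        | some k => (cs.drop (k + 1)).foldl (stepA L) (acc ++ cs.take (k + 1), false) := by
  intro cs
  induction cs with
  | nil => intro acc; simp
  | cons c rest ih =>
    intro acc
    rw [List.foldl_cons]
    by_cases hc : c = ']'
    · subst hc
      have hs : stepA L (acc, true) ']' = (acc ++ [']'], false) := by
        simp [stepA]
      rw [hs]
      rw [List.findIdx?_cons]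
      simp
    · have hs : stepA L (acc, true) c = (acc ++ [c], true) := by
        simp [stepA, hc]
      rw [hs, ih]
      rw [List.findIdx?_cons]
      have hb : (c == ']') = false := by simp [hc]
      rw [hb]
      cases hrest : rest.findIdx? (· == ']') with
      | none => simp
      | some k => simp

theorem loopA_false (L : List Char) :
    ∀ (cs acc : List Char),
      (cs.foldl (stepA L) (acc, false)).1 = acc ++ loopB L (buildClasses L) cs := by
  intro cs
  induction hn : cs.length using Nat.strong_induction_on generalizing cs with
  | _ n ih =>
    cases cs with
    | nil => intro acc; simp [loopB]
    | cons c rest =>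
      intro acc
      rw [List.foldl_cons]
      by_cases hc : c = '['
      · subst hc
        have hs : stepA L (acc, false) '[' = (acc ++ ['['], true) := by
          simp [stepA]
        rw [hs, loopA_true]
        cases hr : rest.findIdx? (· == ']') with
        | none =>
          rw [loopB, if_pos rfl, hr]
          simp
        | some k =>
          rw [loopB, if_pos rfl, hr]
          have hlen : (rest.drop (k + 1)).length < n := by
            subst hn; simp
          rw [ih _ hlen _ rfl]
          simp
      · have hs : stepA L (acc, false) c =
            (acc ++ (if 1 < (eqvChars c L).length then '[' :: (eqvChars c L ++ [']']) else eqvChars c L), false) := by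
          simp only [stepA, if_neg hc]
          by_cases hcr : c = ']' <;> simp [hcr]
        rw [hs]
        have hlen : rest.length < n := by subst hn; simp
        rw [ih _ hlen _ rfl]
        rw [loopB, if_neg hc]
        rw [← emit_eq L c]
        simp

-- ===== VERDICT (by name: the statement is the Claim_ definition above) =====
theorem case_insensitive_regexp_spec : Claim_equal_case_insensitive_regexp := by
  intro regexp collate_table _
  show _ = _
  unfold case_insensitive_regexp case_insensitive_regexp_alt
  rw [loopA_false collate_table.toList regexp.toList []]
  rfl
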